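-- pv_equiv track=rewrite | github.com/The-Alphabet-Cartel/ash-dash | src/models/enums.py | get_role_from_groups
-- ===== SOURCE A (Python) =====
-- from enum import Enum
-- from typing import List, Optional
--
-- class UserRole(str, Enum):
--     """
--     CRT user roles mapped from Pocket-ID groups.
--
--     The role hierarchy from lowest to highest permissions:
--         MEMBER < LEAD < ADMIN
--
--     Each role inherits all permissions from lower roles.
--     """
--
--     MEMBER = "member"
--     LEAD = "lead"
--     ADMIN = "admin"
--
--     def __str__(self) -> str:
--         """Return the role value for string representation."""
--         return self.value
--
--     @property
--     def display_name(self) -> str: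
--         """Human-readable role name."""
--         names = {
--             "member": "CRT Member",
--             "lead": "CRT Lead",
--             "admin": "CRT Admin",
--         }
--         return names.get(self.value, self.value.title())
--
-- POCKET_ID_GROUP_MAP: dict[str, UserRole] = {
--     "cartel_crt_admin": UserRole.ADMIN,
--     "cartel_crt_lead": UserRole.LEAD,
--     "cartel_crt": UserRole.MEMBER,
-- }
--
-- ROLE_HIERARCHY: List[UserRole] = [
--     UserRole.MEMBER,
--     UserRole.LEAD,
--     UserRole.ADMIN,
-- ]
--
-- def get_role_from_groups(groups: List[str]) -> Optional[UserRole]: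
--     """
--     Determine the highest role from a list of Pocket-ID groups.
--
--     When a user belongs to multiple CRT groups, they receive the
--     highest role among their memberships (e.g., if in both
--     cartel_crt and cartel_crt_lead, they get LEAD).
--
--     Args:
--         groups: List of Pocket-ID group names from JWT claims
--
--     Returns:
--         UserRole if user has any CRT group membership, None otherwise
--
--     Examples:
--         >>> get_role_from_groups(["cartel_crt"])
--         UserRole.MEMBER
--
--         >>> get_role_from_groups(["cartel_crt", "cartel_crt_admin"])
--         UserRole.ADMIN
--
--         >>> get_role_from_groups(["some_other_group"])
--         None
--     """
--     if not groups:
--         return None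
--
--     # Find all matching roles
--     user_roles: List[UserRole] = []
--     for group in groups:
--         if group in POCKET_ID_GROUP_MAP:
--             user_roles.append(POCKET_ID_GROUP_MAP[group])
--
--     if not user_roles:
--         return None
--
--     # Return highest role based on hierarchy
--     return max(user_roles, key=lambda r: ROLE_HIERARCHY.index(r))
-- ===== SOURCE B (Python) =====
-- from enum import Enum
-- from typing import List, Optional
--
--
-- class UserRole(str, Enum):
--     MEMBER = "member"
--     LEAD = "lead"
--     ADMIN = "admin"
--
--     def __str__(self) -> str:
--         return self.value
--
--
-- POCKET_ID_GROUP_MAP: dict[str, UserRole] = {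
--     "cartel_crt_admin": UserRole.ADMIN,
--     "cartel_crt_lead": UserRole.LEAD,
--     "cartel_crt": UserRole.MEMBER,
-- }
--
-- ROLE_HIERARCHY: List[UserRole] = [
--     UserRole.MEMBER,
--     UserRole.LEAD,
--     UserRole.ADMIN,
-- ]
--
--
-- def get_role_from_groups(groups: List[str]) -> Optional[UserRole]:
--     """Highest CRT role: index groups into a set of roles, then scan the
--     hierarchy from highest to lowest and return the first role present."""
--     present = {POCKET_ID_GROUP_MAP[g] for g in groups if g in POCKET_ID_GROUP_MAP}
--     for role in reversed(ROLE_HIERARCHY):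
--         if role in present:
--             return role
--     return None
-- ===== Notes on version B (the rewrite author's own statement) =====
-- stated objective: simpler
-- what changed: Replaces A's collect-a-list-then-max-by-hierarchy-index pass with building a set of present roles and scanning the fixed hierarchy from highest to lowest, returning the first role found.
import Mathlib
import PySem

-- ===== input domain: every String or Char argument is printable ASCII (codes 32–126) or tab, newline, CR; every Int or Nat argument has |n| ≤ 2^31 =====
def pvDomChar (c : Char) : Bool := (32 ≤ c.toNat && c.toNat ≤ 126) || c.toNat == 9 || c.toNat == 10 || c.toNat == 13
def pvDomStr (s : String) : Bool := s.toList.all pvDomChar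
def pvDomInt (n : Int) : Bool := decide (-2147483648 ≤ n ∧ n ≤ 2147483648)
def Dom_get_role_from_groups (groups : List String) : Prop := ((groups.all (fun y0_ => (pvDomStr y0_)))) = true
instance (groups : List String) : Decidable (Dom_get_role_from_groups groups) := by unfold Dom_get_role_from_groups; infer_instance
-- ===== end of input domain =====

-- B replaces A's collect-list-then-max-by-hierarchy-index with a set of present
-- roles scanned against the fixed hierarchy highest-first (simpler decomposition).

-- ===== PORT A =====
-- shared module constants (UserRole values are their strings)
def POCKET_ID_GROUP_MAP : PySem.Dict String String :=
  PySem.Dict.ofList [("cartel_crt_admin", "admin"), ("cartel_crt_lead", "lead"), ("cartel_crt", "member")]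

def ROLE_HIERARCHY : List String := ["member", "lead", "admin"]

-- ROLE_HIERARCHY.index(r): every collected role is a value of the map, hence in the
-- hierarchy, so Python's .index never raises; List.idxOf is exact there.
def pvHierIdx (r : String) : Nat := ROLE_HIERARCHY.idxOf r

def get_role_from_groups (groups : List String) : Option String :=
  if groups = [] then none
  else
    -- for group in groups: if group in POCKET_ID_GROUP_MAP: user_roles.append(...)
    let user_roles : List String := groups.foldl (fun acc g =>
      match POCKET_ID_GROUP_MAP.get? g with
      | some r => acc ++ [r]
      | none => acc) []
    if user_roles = [] then none
    else PySem.List.max? user_roles pvHierIdx   -- max(user_roles, key=ROLE_HIERARCHY.index)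

-- ===== PORT B =====
def get_role_from_groups_alt (groups : List String) : Option String :=
  -- present = {POCKET_ID_GROUP_MAP[g] for g in groups if g in POCKET_ID_GROUP_MAP}
  let present : PySem.Set String := groups.foldl (fun s g =>
    match POCKET_ID_GROUP_MAP.get? g with
    | some r => PySem.Set.add s r
    | none => s) PySem.Set.empty
  -- for role in reversed(ROLE_HIERARCHY): if role in present: return role
  pvFirstPresent ROLE_HIERARCHY.reverse present
where
  pvFirstPresent : List String → PySem.Set String → Option String
  | [], _ => none
  | r :: rest, present => if PySem.Set.contains present r then some r else pvFirstPresent rest present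

-- ===== PRECONDITION & SPEC =====
def Spec_get_role_from_groups (groups : List String) (out : Option String) : Prop := out = get_role_from_groups_alt groups
instance (groups : List String) (out : Option String) : Decidable (Spec_get_role_from_groups groups out) := by unfold Spec_get_role_from_groups; infer_instance

-- ===== CLAIM (what is proved, stated in full; the proofs are below) =====
def Claim_equal_get_role_from_groups : Prop := ∀ (groups : List String), Dom_get_role_from_groups groups → Spec_get_role_from_groups groups (get_role_from_groups groups)

-- ===== LEMMAS AND PROOFS =====

-- Every value the group map can return is one of the three role strings.
lemma pvMapRange (g r : String) (h : POCKET_ID_GROUP_MAP.get? g = some r) :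
    r = "admin" ∨ r = "lead" ∨ r = "member" := by
  have e : POCKET_ID_GROUP_MAP
      = PySem.Dict.mk [("cartel_crt_admin", "admin"), ("cartel_crt_lead", "lead"), ("cartel_crt", "member")] := by
    rfl
  rw [e] at h
  simp only [PySem.Dict.get?_mk_cons] at h
  split_ifs at h <;> simp_all [PySem.Dict.get?]

-- A's collecting loop is a filterMap over the group map.
lemma pvCollect (groups : List String) (acc : List String) :
    groups.foldl (fun acc g =>
      match POCKET_ID_GROUP_MAP.get? g with
      | some r => acc ++ [r]
      | none => acc) acc
    = acc ++ groups.filterMap (fun g => POCKET_ID_GROUP_MAP.get? g) := by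
  induction groups generalizing acc with
  | nil => simp
  | cons g rest ih =>
    simp only [List.foldl_cons, List.filterMap_cons]
    cases h : POCKET_ID_GROUP_MAP.get? g <;> simp [ih]

-- B's set-building loop has exactly the matched roles as members.
lemma pvPresentMem (groups : List String) (s : PySem.Set String) (y : String) :
    y ∈ groups.foldl (fun s g =>
      match POCKET_ID_GROUP_MAP.get? g with
      | some r => PySem.Set.add s r
      | none => s) s
    ↔ y ∈ s ∨ y ∈ groups.filterMap (fun g => POCKET_ID_GROUP_MAP.get? g) := by
  induction groups generalizing s with
  | nil => simp
  | cons g rest ih =>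
    simp only [List.foldl_cons, List.filterMap_cons]
    cases h : POCKET_ID_GROUP_MAP.get? g with
    | none => simp [ih]
    | some r => simp [ih, PySem.Set.mem_add]; tauto

-- Characterisation of A's max-by-hierarchy-index over a nonempty list of role strings.
lemma pvMaxChar (L : List String) (h3 : ∀ x ∈ L, x = "admin" ∨ x = "lead" ∨ x = "member")
    (hne : L ≠ []) :
    PySem.List.max? L pvHierIdx
      = some (if "admin" ∈ L then "admin" else if "lead" ∈ L then "lead" else "member") := by
  cases hm : PySem.List.max? L pvHierIdx with
  | none => exact absurd (((PySem.List.max?_eq_none_iff L pvHierIdx).mp hm)) hne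
  | some m =>
    have hmem : m ∈ L := PySem.List.max?_mem hm
    have hmax : ∀ y ∈ L, pvHierIdx y ≤ pvHierIdx m := PySem.List.max?_isMax hm
    have hm3 := h3 m hmem
    congr 1
    by_cases ha : "admin" ∈ L
    · have h2 : pvHierIdx "admin" ≤ pvHierIdx m := hmax _ ha
      rcases hm3 with h | h | h <;> simp [ha, h] <;> simp [h, pvHierIdx, ROLE_HIERARCHY] at h2
    · by_cases hl : "lead" ∈ L
      · have h1 : pvHierIdx "lead" ≤ pvHierIdx m := hmax _ hl
        rcases hm3 with h | h | h
        · exact absurd (h ▸ hmem) ha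
        · simp [ha, hl, h]
        · simp [h, pvHierIdx, ROLE_HIERARCHY] at h1
      · rcases hm3 with h | h | h
        · exact absurd (h ▸ hmem) ha
        · exact absurd (h ▸ hmem) hl
        · simp [ha, hl, h]

-- B's hierarchy scan, unrolled over the fixed reversed hierarchy.
lemma pvScan (present : PySem.Set String) :
    get_role_from_groups_alt.pvFirstPresent ROLE_HIERARCHY.reverse present
      = if "admin" ∈ present then some "admin"
        else if "lead" ∈ present then some "lead"
        else if "member" ∈ present then some "member"
        else none := by
  show get_role_from_groups_alt.pvFirstPresent ["admin", "lead", "member"] present = _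
  simp only [get_role_from_groups_alt.pvFirstPresent]
  by_cases ha : "admin" ∈ present <;> by_cases hl : "lead" ∈ present <;>
    by_cases hme : "member" ∈ present <;>
    simp [ha, hl, hme]

-- ===== VERDICT (by name: the statement is the Claim_ definition above) =====
theorem get_role_from_groups_spec : Claim_equal_get_role_from_groups := by
  intro groups _
  unfold Spec_get_role_from_groups
  unfold get_role_from_groups get_role_from_groups_alt
  rw [pvCollect, pvScan]
  simp only [List.nil_append]
  set F := groups.filterMap (fun g => POCKET_ID_GROUP_MAP.get? g) with hFdef
  have hmem : ∀ y, (y ∈ groups.foldl (fun s g =>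
      match POCKET_ID_GROUP_MAP.get? g with
      | some r => PySem.Set.add s r
      | none => s) PySem.Set.empty) ↔ y ∈ F := by
    intro y
    rw [pvPresentMem]
    simp [PySem.Set.empty, hFdef, List.mem_filterMap]
  have h3 : ∀ x ∈ F, x = "admin" ∨ x = "lead" ∨ x = "member" := by
    intro x hx
    obtain ⟨g, _, hg⟩ := List.mem_filterMap.mp hx
    exact pvMapRange g x hg
  simp only [hmem]
  by_cases hg : groups = []
  · have hF : F = [] := by simp [hFdef, hg]
    simp [hg, hF]
  · rw [if_neg hg]
    by_cases hF : F = []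
    · simp [hF]
    · rw [if_neg hF, pvMaxChar F h3 hF]
      by_cases ha : "admin" ∈ F
      · simp [ha]
      · by_cases hl : "lead" ∈ F
        · simp [ha, hl]
        · have hme : "member" ∈ F := by
            obtain ⟨x, hx⟩ := List.exists_mem_of_ne_nil F hF
            rcases h3 x hx with h | h | h
            · exact absurd (h ▸ hx) ha
            · exact absurd (h ▸ hx) hl
            · exact h ▸ hx
          simp [ha, hl, hme]
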